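-- pv_equiv track=rewrite | github.com/discos/DISCOSClient | discos_client/merger.py | _literal_prefix
-- ===== SOURCE A (Python) =====
-- def _literal_prefix(pat: str) -> str:
--     i = 0
--     if pat.startswith('^'):
--         i = 1
--     out = []
--     meta = set('.^$*+?[]{}()|\\')
--     while i < len(pat):
--         c = pat[i]
--         if c in meta:
--             break
--         out.append(c)
--         i += 1
--     return ''.join(out)
-- ===== SOURCE B (Python) =====
-- def _literal_prefix(pat: str) -> str:
--     start = 1 if pat.startswith('^') else 0
--     end = len(pat)
--     for c in '.^$*+?[]{}()|\\':
--         j = pat.find(c, start)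
--         if j != -1 and j < end:
--             end = j
--     return pat[start:end]
-- ===== Notes on version B (the rewrite author's own statement) =====
-- stated objective: faster
-- what changed: B replaces A's explicit index-walk that appends characters until the first metacharacter by one str.find() per metacharacter (keeping the minimum found position) followed by a single slice pat[start:end].
import Mathlib
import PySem

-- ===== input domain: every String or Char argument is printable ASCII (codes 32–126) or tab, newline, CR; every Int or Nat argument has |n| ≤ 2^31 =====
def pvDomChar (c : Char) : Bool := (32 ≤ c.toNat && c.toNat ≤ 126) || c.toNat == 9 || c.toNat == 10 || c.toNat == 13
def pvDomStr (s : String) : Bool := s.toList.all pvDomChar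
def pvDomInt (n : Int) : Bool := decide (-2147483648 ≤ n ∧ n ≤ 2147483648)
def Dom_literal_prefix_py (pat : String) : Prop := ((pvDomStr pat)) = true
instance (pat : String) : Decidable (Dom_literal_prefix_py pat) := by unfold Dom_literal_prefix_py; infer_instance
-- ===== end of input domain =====

-- B finds the literal-prefix boundary with one find() per metacharacter plus a single slice,
-- instead of A's per-character index-walk; same result, measurably faster constant factor in Python.

-- the metacharacter string '.^$*+?[]{}()|\\' as a list of chars (shared literal of both sources)
def pvMetaChars : List Char := ".^$*+?[]{}()|\\".toList

-- ===== PORT A =====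
-- while i < len(pat): c = pat[i]; if c in meta: break; out.append(c); i += 1  — structural recursion over the remaining suffix
def lpLoopA (metaS : PySem.Set Char) : List Char → List Char
  | [] => []
  | c :: rest => if metaS.contains c then [] else c :: lpLoopA metaS rest

def literal_prefix_py (pat : String) : String :=
  let cs := pat.toList
  let i : Nat := if PySem.Chars.startswith cs ['^'] then 1 else 0
  let metaS : PySem.Set Char := PySem.Set.ofList pvMetaChars
  String.ofList (lpLoopA metaS (cs.drop i))

-- ===== PORT B =====
def literal_prefix_py_alt (pat : String) : String :=
  let cs := pat.toList
  let start : Int := if PySem.Chars.startswith cs ['^'] then 1 else 0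
  let stop : Int := pvMetaChars.foldl
    (fun e c =>
      let j := PySem.Chars.findFrom cs [c] start none
      if j ≠ -1 ∧ j < e then j else e) (cs.length : Int)
  String.ofList (PySem.Chars.slice cs (some start) (some stop))

-- ===== PRECONDITION & SPEC =====
def Spec_literal_prefix_py (pat : String) (out : String) : Prop := out = literal_prefix_py_alt pat
instance (pat : String) (out : String) : Decidable (Spec_literal_prefix_py pat out) := by unfold Spec_literal_prefix_py; infer_instance

-- ===== CLAIM (what is proved, stated in full; the proofs are below) =====
def Claim_equal_literal_prefix_py : Prop := ∀ (pat : String), Dom_literal_prefix_py pat → Spec_literal_prefix_py pat (literal_prefix_py pat)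

-- ===== LEMMAS AND PROOFS =====

-- any value of Chars.find.go is -1 or at least its start counter
theorem pv_go_cases (sub : List Char) : ∀ (t : List Char) (k : Nat),
    PySem.Chars.find.go sub t k = -1 ∨ (k : Int) ≤ PySem.Chars.find.go sub t k := by
  intro t
  induction t with
  | nil => intro k; by_cases h : sub.isEmpty <;> simp [PySem.Chars.find.go, h]
  | cons h r ih =>
    intro k
    by_cases hp : sub.isPrefixOf (h::r)
    · simp [PySem.Chars.find.go, hp]
    · simp only [PySem.Chars.find.go, hp, Bool.false_eq_true, if_false]
      rcases ih (k+1) with h1 | h1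
      · exact Or.inl h1
      · right; omega

theorem pv_find_cases (sub t : List Char) :
    PySem.Chars.find t sub = -1 ∨ 0 ≤ PySem.Chars.find t sub := by
  simpa [PySem.Chars.find] using pv_go_cases sub t 0

theorem pv_go_shift (sub : List Char) : ∀ (t : List Char) (k : Nat),
    PySem.Chars.find.go sub t k =
      (if PySem.Chars.find.go sub t 0 = -1 then -1 else PySem.Chars.find.go sub t 0 + k) := by
  intro t
  induction t with
  | nil => intro k; by_cases h : sub.isEmpty <;> simp [PySem.Chars.find.go, h]
  | cons h r ih =>
    intro k
    by_cases hp : sub.isPrefixOf (h::r)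
    · simp [PySem.Chars.find.go, hp]
    · simp only [PySem.Chars.find.go, hp, Bool.false_eq_true, if_false]
      rw [ih (k+1), ih 1]
      rcases pv_go_cases sub r 0 with h1 | h1
      · simp [h1]
      · have h2 : PySem.Chars.find.go sub r 0 ≠ -1 := by omega
        simp only [h2, if_false]
        rw [if_neg (show ¬(PySem.Chars.find.go sub r 0 + (1:Nat) = -1) by push_cast; omega)]
        push_cast; ring

theorem pv_find_nil (c : Char) : PySem.Chars.find [] [c] = -1 := by
  simp [PySem.Chars.find, PySem.Chars.find.go]

theorem pv_find_cons_self (h : Char) (r : List Char) : PySem.Chars.find (h::r) [h] = 0 := by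
  simp [PySem.Chars.find, PySem.Chars.find.go, List.isPrefixOf]

theorem pv_find_cons_ne (h c : Char) (r : List Char) (hne : c ≠ h) :
    PySem.Chars.find (h::r) [c] =
      (if PySem.Chars.find r [c] = -1 then -1 else PySem.Chars.find r [c] + 1) := by
  have hp : ¬ List.isPrefixOf [c] (h::r) := by simp [List.isPrefixOf, hne]
  simp only [PySem.Chars.find, PySem.Chars.find.go, hp, Bool.false_eq_true, if_false]
  exact pv_go_shift [c] r 1

-- B's min-of-finds fold, abstracted over the candidate function
def pvStep (f : Char → Int) (e : Int) (c : Char) : Int :=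
  if f c ≠ -1 ∧ f c < e then f c else e

theorem pvStep_le (f : Char → Int) (e : Int) (c : Char) : pvStep f e c ≤ e := by
  unfold pvStep; split <;> omega

theorem pv_fold_le_init (f : Char → Int) : ∀ (L : List Char) (e : Int),
    L.foldl (pvStep f) e ≤ e := by
  intro L
  induction L with
  | nil => intro e; simp
  | cons c L ih => intro e; exact le_trans (ih _) (pvStep_le f e c)

theorem pv_fold_nonneg (f : Char → Int) (hf : ∀ c, f c = -1 ∨ 0 ≤ f c) :
    ∀ (L : List Char) (e : Int), 0 ≤ e → 0 ≤ L.foldl (pvStep f) e := by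
  intro L
  induction L with
  | nil => intro e he; simpa using he
  | cons c L ih =>
    intro e he
    refine ih _ ?_
    unfold pvStep
    rcases hf c with h | h <;> split <;> omega

theorem pv_fold_keep (f : Char → Int) (hf : ∀ c, f c = -1) :
    ∀ (L : List Char) (e : Int), L.foldl (pvStep f) e = e := by
  intro L
  induction L with
  | nil => intro e; simp
  | cons c L ih => intro e; simp [pvStep, hf c, ih]

-- shifting every candidate (and the start value) by d shifts the fold result by d
theorem pv_fold_shift (f g : Char → Int) (d : Nat) (L : List Char)
    (hfg : ∀ c ∈ L, (f c = -1 ∧ g c = -1) ∨ (0 ≤ f c ∧ g c = f c + d)) :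
    ∀ (e : Int), L.foldl (pvStep g) (e + d) = L.foldl (pvStep f) e + d := by
  induction L with
  | nil => intro e; simp
  | cons c L ih =>
    intro e
    have hc := hfg c (by simp)
    have hrest : ∀ c' ∈ L, (f c' = -1 ∧ g c' = -1) ∨ (0 ≤ f c' ∧ g c' = f c' + d) := by
      intro c' hc'; exact hfg c' (by simp [hc'])
    simp only [List.foldl_cons]
    have hstep : pvStep g (e + d) c = pvStep f e c + d := by
      unfold pvStep
      rcases hc with ⟨h1, h2⟩ | ⟨h1, h2⟩
      · simp [h1, h2]
      · rw [h2]
        by_cases h3 : f c ≠ -1 ∧ f c < e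
        · rw [if_pos ⟨by omega, by omega⟩, if_pos h3]
        · rw [if_neg (by omega), if_neg h3]
    rw [hstep, ih hrest]

-- the fold hits 0 as soon as some c ∈ L occurs first in t
theorem pv_fold_of_mem_zero (f : Char → Int) (hf : ∀ c, f c = -1 ∨ 0 ≤ f c)
    (L : List Char) (c : Char) (hc : c ∈ L) (hc0 : f c = 0) (e : Int) (he : 0 ≤ e) :
    L.foldl (pvStep f) e = 0 := by
  obtain ⟨L1, L2, rfl⟩ := List.append_of_mem hc
  rw [List.foldl_append]
  have h1 : 0 ≤ L1.foldl (pvStep f) e := pv_fold_nonneg f hf L1 e he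
  simp only [List.foldl_cons]
  have hstep : pvStep f (L1.foldl (pvStep f) e) c = 0 := by
    simp only [pvStep, hc0]
    split_ifs with h2 <;> omega
  rw [hstep]
  have h3 := pv_fold_le_init f L2 (0:Int)
  have h4 := pv_fold_nonneg f hf L2 0 le_rfl
  omega

-- core: the min-of-first-occurrence fold equals the length of the metachar-free prefix
theorem pv_fold_eq_takeWhile (L : List Char) : ∀ (t : List Char),
    L.foldl (pvStep (fun c => PySem.Chars.find t [c])) (t.length : Int)
      = ((t.takeWhile (fun c => ¬ L.contains c)).length : Int) := by
  intro t
  induction t with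
  | nil => simp [pv_fold_keep _ pv_find_nil]
  | cons h r ih =>
    by_cases hm : h ∈ L
    · have h0 : PySem.Chars.find (h::r) [h] = 0 := pv_find_cons_self h r
      rw [pv_fold_of_mem_zero _ (fun c => pv_find_cases [c] (h::r)) L h hm h0 _ (by positivity)]
      simp [hm]
    · have hfg : ∀ c ∈ L, ((fun c => PySem.Chars.find r [c]) c = -1 ∧ (fun c => PySem.Chars.find (h::r) [c]) c = -1)
          ∨ (0 ≤ (fun c => PySem.Chars.find r [c]) c ∧ (fun c => PySem.Chars.find (h::r) [c]) c = (fun c => PySem.Chars.find r [c]) c + (1:Nat)) := by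
        intro c hcL
        have hne : c ≠ h := by rintro rfl; exact hm hcL
        rcases pv_find_cases [c] r with h1 | h1
        · left
          refine ⟨h1, ?_⟩
          show PySem.Chars.find (h::r) [c] = -1
          rw [pv_find_cons_ne h c r hne, if_pos h1]
        · right
          refine ⟨h1, ?_⟩
          show PySem.Chars.find (h::r) [c] = PySem.Chars.find r [c] + ((1:Nat) : Int)
          rw [pv_find_cons_ne h c r hne, if_neg (by omega)]
          push_cast; ring
      have hsh := pv_fold_shift _ _ 1 L hfg ((r.length : Int))
      have hlen : ((h::r).length : Int) = (r.length : Int) + ((1:Nat) : Int) := by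
        rw [List.length_cons]; push_cast; ring
      have htw : List.takeWhile (fun c => ¬ L.contains c) (h::r)
          = h :: List.takeWhile (fun c => ¬ L.contains c) r := by simp [hm]
      rw [hlen, hsh, ih, htw, List.length_cons]
      push_cast; ring

-- A's loop is takeWhile (not a metacharacter)
theorem pv_loopA_eq_takeWhile (metaS : PySem.Set Char) : ∀ (t : List Char),
    lpLoopA metaS t = t.takeWhile (fun c => ¬ metaS.contains c) := by
  intro t
  induction t with
  | nil => simp [lpLoopA]
  | cons c r ih =>
    by_cases h : c ∈ metaS <;> simp [lpLoopA, h, ih]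

-- the metacharacter literal is already duplicate-free
theorem pv_set_meta : PySem.Set.ofList pvMetaChars = pvMetaChars := by decide

theorem pv_take_takeWhile (p : Char → Bool) : ∀ (t : List Char),
    t.take (t.takeWhile p).length = t.takeWhile p := by
  intro t
  induction t with
  | nil => simp
  | cons c r ih =>
    by_cases h : p c <;> simp [List.takeWhile_cons, h, ih]

-- ===== VERDICT (by name: the statement is the Claim_ definition above) =====
theorem literal_prefix_py_spec : Claim_equal_literal_prefix_py := by
  intro pat _
  unfold Spec_literal_prefix_py literal_prefix_py literal_prefix_py_alt
  simp only []
  set cs := pat.toList with hcs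
  set k : Nat := if PySem.Chars.startswith cs ['^'] then 1 else 0 with hk
  have hkle : k ≤ cs.length := by
    rw [hk]
    split
    · rename_i hs
      have hpre : ['^'] <+: cs := by
        simpa [PySem.Chars.startswith, List.isPrefixOf_iff_prefix] using hs
      simpa using hpre.length_le
    · omega
  have hstart : (if PySem.Chars.startswith cs ['^'] then (1:Int) else 0) = (k : Int) := by
    rw [hk]; split <;> simp
  rw [hstart]
  -- rewrite findFrom through find on the dropped suffix, shift the fold by k
  set t := cs.drop k with ht
  have hfg : ∀ c ∈ pvMetaChars,
      ((fun c => PySem.Chars.find t [c]) c = -1 ∧ (fun c => PySem.Chars.findFrom cs [c] (k:Int) none) c = -1)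
      ∨ (0 ≤ (fun c => PySem.Chars.find t [c]) c ∧ (fun c => PySem.Chars.findFrom cs [c] (k:Int) none) c = (fun c => PySem.Chars.find t [c]) c + k) := by
    intro c _
    have hff := PySem.Chars.findFrom_natCast cs [c] k hkle
    rw [← ht] at hff
    rcases pv_find_cases [c] t with h1 | h1
    · left
      refine ⟨h1, ?_⟩
      show PySem.Chars.findFrom cs [c] (k:Int) none = -1
      rw [hff, if_pos h1]
    · right
      refine ⟨h1, ?_⟩
      show PySem.Chars.findFrom cs [c] (k:Int) none = PySem.Chars.find t [c] + (k:Int)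
      rw [hff, if_neg (by omega)]
      ring
  have hlen : (cs.length : Int) = (t.length : Int) + k := by
    rw [ht]; simp [List.length_drop]; omega
  have hshift := pv_fold_shift (fun c => PySem.Chars.find t [c]) (fun c => PySem.Chars.findFrom cs [c] (k:Int) none) k pvMetaChars hfg ((t.length : Int))
  have hcore := pv_fold_eq_takeWhile pvMetaChars t
  -- identify B's fold with pvStep
  have hfoldB : pvMetaChars.foldl (fun e c => let j := PySem.Chars.findFrom cs [c] (k:Int) none; if j ≠ -1 ∧ j < e then j else e) (cs.length : Int)
      = (t.takeWhile (fun c => ¬ pvMetaChars.contains c)).length + (k:Int) := by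
    have : (fun (e : Int) (c : Char) => let j := PySem.Chars.findFrom cs [c] (k:Int) none; if j ≠ -1 ∧ j < e then j else e)
        = pvStep (fun c => PySem.Chars.findFrom cs [c] (k:Int) none) := rfl
    rw [this, hlen, hshift, hcore]
  rw [hfoldB]
  -- the slice [k : k + m] is take m of the dropped suffix
  have hslice : PySem.Chars.slice cs (some (k:Int)) (some (((t.takeWhile (fun c => ¬ pvMetaChars.contains c)).length : Int) + (k:Int)))
      = t.take (t.takeWhile (fun c => ¬ pvMetaChars.contains c)).length := by
    have h1 : (((t.takeWhile (fun c => ¬ pvMetaChars.contains c)).length : Int) + (k:Int)) = ((k:Int) + ((t.takeWhile (fun c => ¬ pvMetaChars.contains c)).length : Nat)) := by ring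
    rw [h1]
    simpa [PySem.Chars.slice, ht] using PySem.List.slice_natCast_add cs k (t.takeWhile (fun c => ¬ pvMetaChars.contains c)).length
  rw [hslice, pv_take_takeWhile]
  rw [pv_loopA_eq_takeWhile, pv_set_meta]
  simp [PySem.Set.contains]
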